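-- pv_equiv track=rewrite | github.com/Sandeep-Singh27/Minor-Project-AI-Driven-Management-System | setSequence.py | setSequence
-- ===== SOURCE A (Python) =====
-- def setSequence(l:list):
--     indexed_l = list(enumerate(l))
--     sorted_pairs = sorted(indexed_l, key=lambda x: x[1], reverse=True)
--     ranks = [0] * len(l)
--     for rank, (idx, _) in enumerate(sorted_pairs, start=1):
--         ranks[idx] = rank
--     d = {ranks[i]: l[i] for i in range(len(l))}
--     return d
-- ===== SOURCE B (Python) =====
-- def setSequence(l: list):
--     d = {}
--     for i, v in enumerate(l):
--         rank = 1 + sum(1 for x in l if x > v) + l[:i].count(v)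
--         d[rank] = v
--     return d
-- ===== Notes on version B (the rewrite author's own statement) =====
-- stated objective: alternative
-- what changed: B drops the sort and all index/inverse-permutation bookkeeping: each element's descending rank is computed directly as 1 + (count of strictly greater elements) + (count of equal elements earlier in the list), and the dict is built in one pass over the original list.
import Mathlib
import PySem

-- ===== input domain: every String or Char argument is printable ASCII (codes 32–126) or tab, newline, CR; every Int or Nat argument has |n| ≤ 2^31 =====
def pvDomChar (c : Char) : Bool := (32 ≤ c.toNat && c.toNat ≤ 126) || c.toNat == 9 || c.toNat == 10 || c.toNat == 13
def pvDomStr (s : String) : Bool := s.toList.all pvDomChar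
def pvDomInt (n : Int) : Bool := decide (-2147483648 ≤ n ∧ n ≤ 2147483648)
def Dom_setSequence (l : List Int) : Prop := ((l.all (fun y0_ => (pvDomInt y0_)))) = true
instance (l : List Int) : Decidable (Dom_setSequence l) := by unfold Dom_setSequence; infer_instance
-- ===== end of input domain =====

-- B replaces A's sort + inverse-permutation bookkeeping by a direct per-element rank count (alternative decomposition, not claimed faster).

-- ===== PORT A =====
-- In A every index is in range: `idx` comes from enumerate (so 0 ≤ idx, .toNat is exact)
-- and `ranks[i]`/`l[i]` are read at i ∈ range(len(l)), so pyGetD's default is never used.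
def setSequence (l : List Int) : List (Int × Int) :=
  let indexed_l := PySem.List.enumerate l
  let sorted_pairs := PySem.List.sorted indexed_l (fun x => x.2) true
  let ranks0 : List Int := List.replicate l.length (0 : Int)
  let ranks := (PySem.List.enumerate sorted_pairs 1).foldl
      (fun acc rp => acc.set rp.2.1.toNat rp.1) ranks0
  ((PySem.List.pyRange 0 (l.length : Int)).foldl
      (fun d i => d.insert (PySem.List.pyGetD ranks i 0) (PySem.List.pyGetD l i 0))
      PySem.Dict.empty).items

-- ===== PORT B =====
def setSequence_alt (l : List Int) : List (Int × Int) :=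
  ((PySem.List.enumerate l).foldl
      (fun d p =>
        let rank : Int := 1 + (l.map (fun x => if p.2 < x then (1 : Int) else 0)).sum
            + (PySem.List.count (PySem.List.slice l none (some p.1)) p.2 : Int)
        d.insert rank p.2)
      PySem.Dict.empty).items

-- ===== PRECONDITION & SPEC =====
def Spec_setSequence (l : List Int) (out : List (Int × Int)) : Prop := out = setSequence_alt l
instance (l : List Int) (out : List (Int × Int)) : Decidable (Spec_setSequence l out) := by unfold Spec_setSequence; infer_instance

-- ===== CLAIM (what is proved, stated in full; the proofs are below) =====
def Claim_equal_setSequence : Prop := ∀ (l : List Int), Dom_setSequence l → Spec_setSequence l (setSequence l)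

-- ===== LEMMAS AND PROOFS =====

/-- strict "comes earlier in A's descending stable sort" order on (index, value) pairs -/
def lexGT (a b : Int × Int) : Bool := decide (b.2 < a.2 ∨ (a.2 = b.2 ∧ a.1 < b.1))

/-- the rank both programs assign to the element (i, v) of `enumerate l` -/
def rkey (l : List Int) (i v : Int) : Int :=
  1 + ((PySem.List.enumerate l).countP (fun y => lexGT y (i, v)) : Int)

theorem lexGT_irrefl (a : Int × Int) : lexGT a a = false := by
  simp [lexGT]

theorem lexGT_asymm {a b : Int × Int} (h : lexGT a b = true) : lexGT b a = false := by
  simp [lexGT] at *; omega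

/-- inserting a pair with a larger index keeps the list strictly sorted for lexGT -/
theorem insertBy_pairwise (x : Int × Int) (acc : List (Int × Int))
    (hp : acc.Pairwise (fun a b => lexGT a b = true))
    (hidx : ∀ y ∈ acc, y.1 < x.1) :
    (PySem.List.insertBy (fun a b => decide (b.2 < a.2)) x acc).Pairwise
      (fun a b => lexGT a b = true) := by
  induction acc with
  | nil => simp [PySem.List.insertBy]
  | cons y ys ih =>
    rw [List.pairwise_cons] at hp
    by_cases hb : y.2 < x.2
    · have hx : PySem.List.insertBy (fun a b => decide (b.2 < a.2)) x (y :: ys) = x :: y :: ys := by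
        simp [PySem.List.insertBy, hb]
      rw [hx, List.pairwise_cons]
      refine ⟨?_, by rw [List.pairwise_cons]; exact hp⟩
      intro z hz
      rcases List.mem_cons.1 hz with rfl | hz
      · simp [lexGT]; omega
      · have := hp.1 z hz
        simp [lexGT] at this ⊢
        omega
    · have hx : PySem.List.insertBy (fun a b => decide (b.2 < a.2)) x (y :: ys)
          = y :: PySem.List.insertBy (fun a b => decide (b.2 < a.2)) x ys := by
        simp [PySem.List.insertBy, hb]
      rw [hx, List.pairwise_cons]
      constructor
      · intro z hz
        rw [PySem.List.mem_insertBy] at hz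
        rcases hz with rfl | hz
        · have := hidx y (by simp)
          simp [lexGT] at *
          omega
        · exact hp.1 z hz
      · exact ih hp.2 (fun w hw => hidx w (by simp [hw]))

/-- the insertion-sort fold over `enumerate l s` stays strictly lexGT-sorted -/
theorem foldl_insertBy_pairwise (l : List Int) (s : Int) (acc : List (Int × Int))
    (hp : acc.Pairwise (fun a b => lexGT a b = true))
    (hidx : ∀ y ∈ acc, y.1 < s) :
    (((PySem.List.enumerate l s).foldl
        (fun a x => PySem.List.insertBy (fun a b => decide (b.2 < a.2)) x a) acc).Pairwise
      (fun a b => lexGT a b = true)) ∧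
    (∀ y ∈ (PySem.List.enumerate l s).foldl
        (fun a x => PySem.List.insertBy (fun a b => decide (b.2 < a.2)) x a) acc,
      y.1 < s + l.length) := by
  induction l generalizing s acc with
  | nil =>
    rw [PySem.List.enumerate_nil]
    simp only [List.foldl_nil, List.length_nil]
    exact ⟨hp, fun y hy => by have := hidx y hy; omega⟩
  | cons a t ih =>
    rw [PySem.List.enumerate_cons]
    simp only [List.foldl_cons]
    have h1 := insertBy_pairwise (s, a) acc hp hidx
    have h2 : ∀ y ∈ PySem.List.insertBy (fun a b => decide (b.2 < a.2)) (s, a) acc, y.1 < s + 1 := by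
      intro y hy
      rw [PySem.List.mem_insertBy] at hy
      rcases hy with rfl | hy
      · omega
      · have := hidx y hy; omega
    have := ih (s + 1) _ h1 h2
    refine ⟨this.1, ?_⟩
    intro y hy
    have := this.2 y hy
    simp only [List.length_cons]
    omega

theorem sorted_pairs_pairwise (l : List Int) :
    (PySem.List.sorted (PySem.List.enumerate l) (fun x => x.2) true).Pairwise
      (fun a b => lexGT a b = true) := by
  rw [PySem.List.sorted_rev_eq_foldl_insertBy]
  exact (foldl_insertBy_pairwise l 0 [] (by simp) (by simp)).1

/-- in a strictly lexGT-sorted list, the position of an element counts its lexGT-predecessors -/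
theorem countP_eq_pos (m : List (Int × Int)) (hm : m.Pairwise (fun a b => lexGT a b = true))
    (k : Nat) (hk : k < m.length) :
    m.countP (fun y => lexGT y m[k]) = k := by
  induction m generalizing k with
  | nil => simp at hk
  | cons a t ih =>
    rw [List.pairwise_cons] at hm
    cases k with
    | zero =>
      have h0 : List.countP (fun y => lexGT y a) t = 0 :=
        List.countP_eq_zero.2 (fun y hy => by simp [lexGT_asymm (hm.1 y hy)])
      simp [lexGT_irrefl, h0]
    | succ k =>
      have hk' : k < t.length := by simpa using hk
      have hgt : lexGT a t[k] = true := hm.1 _ (List.getElem_mem hk')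
      simp [ih hm.2 k hk', hgt]

/-- the ranks-array fold leaves untouched cells alone -/
theorem foldl_set_untouched (m : List (Int × Int)) (s : Int) (acc : List Int) (j : Nat)
    (h : ∀ p ∈ m, p.1.toNat ≠ j) :
    ((PySem.List.enumerate m s).foldl (fun a rp => a.set rp.2.1.toNat rp.1) acc).getD j 0
      = acc.getD j 0 := by
  induction m generalizing s acc with
  | nil => simp [PySem.List.enumerate_nil]
  | cons p t ih =>
    rw [PySem.List.enumerate_cons]
    simp only [List.foldl_cons]
    rw [ih (s + 1) _ (fun q hq => h q (by simp [hq]))]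
    have hp := h p (by simp)
    simp [List.getD, hp]

/-- the ranks-array fold writes s + (position of (i,v) in m) into cell i -/
theorem foldl_set_value (m : List (Int × Int)) (s : Int) (acc : List Int) (i v : Int)
    (hmem : (i, v) ∈ m) (hnn : ∀ p ∈ m, 0 ≤ p.1) (hnd : (m.map Prod.fst).Nodup)
    (hlen : i.toNat < acc.length) :
    ((PySem.List.enumerate m s).foldl (fun a rp => a.set rp.2.1.toNat rp.1) acc).getD i.toNat 0
      = s + (m.idxOf (i, v) : Int) := by
  induction m generalizing s acc with
  | nil => simp at hmem
  | cons p t ih =>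
    rw [PySem.List.enumerate_cons]
    simp only [List.foldl_cons]
    have hnd' : p.1 ∉ t.map Prod.fst ∧ (t.map Prod.fst).Nodup := by
      simpa using hnd
    by_cases hpe : p = (i, v)
    · subst hpe
      rw [List.idxOf_cons_self]
      rw [foldl_set_untouched]
      · simp only [List.getD, List.getElem?_set, hlen, if_true]
        simp
      · intro q hq
        have h0 : 0 ≤ q.1 := hnn q (by simp [hq])
        have h1 : 0 ≤ (i : Int) := hnn (i, v) (by simp)
        have : q.1 ≠ i := by
          intro he
          apply hnd'.1
          show i ∈ List.map Prod.fst t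
          rw [← he]
          exact List.mem_map_of_mem (f := Prod.fst) hq
        omega
    · have hmem' : (i, v) ∈ t := by
        rcases List.mem_cons.1 hmem with he2 | hm2
        · exact absurd he2.symm hpe
        · exact hm2
      rw [List.idxOf_cons_ne _ hpe]
      rw [ih (s + 1) _ hmem' (fun q hq => hnn q (by simp [hq])) hnd'.2 (by simpa using hlen)]
      simp only [Nat.succ_eq_add_one]
      push_cast
      ring
  
/-- lexGT-count over enumerate = (# strictly greater anywhere) + (# equal before position i) -/
theorem countP_lexGT_enumerate (l : List Int) (s i v : Int) :
    (PySem.List.enumerate l s).countP (fun y => lexGT y (i, v))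
      = l.countP (fun x => decide (v < x)) + (l.take (i - s).toNat).countP (fun x => decide (x = v)) := by
  induction l generalizing s with
  | nil => simp [PySem.List.enumerate_nil]
  | cons a t ih =>
    rw [PySem.List.enumerate_cons, List.countP_cons, ih (s + 1), List.countP_cons]
    by_cases hsi : s < i
    · have ht : (i - s).toNat = (i - (s + 1)).toNat + 1 := by omega
      rw [ht, List.take_succ_cons, List.countP_cons]
      by_cases h1 : v < a
      · have h2 : ¬ a = v := by omega
        simp [lexGT, h1, h2]
        omega
      · by_cases h2 : a = v
        · simp [lexGT, h2, hsi]
          omega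
        · simp [lexGT, h1, h2]
    · have ht : (i - s).toNat = 0 := by omega
      have ht2 : (i - (s + 1)).toNat = 0 := by omega
      rw [ht, ht2, List.take_zero]
      by_cases h1 : v < a
      · simp [lexGT, h1]
      · simp [lexGT, h1, hsi]

/-- inserting pairwise-distinct fresh keys into a dict just appends them -/
theorem dict_fold_items {α : Type} (ps : List α) (f g : α → Int) (acc : List (Int × Int))
    (h1 : (ps.map f).Nodup) (h2 : ∀ p ∈ ps, ∀ q ∈ acc, q.1 ≠ f p) :
    (ps.foldl (fun d p => d.insert (f p) (g p)) (PySem.Dict.mk acc)).items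
      = acc ++ ps.map (fun p => (f p, g p)) := by
  induction ps generalizing acc with
  | nil => simp
  | cons p t ih =>
    simp only [List.foldl_cons]
    have hn : (f p ∉ t.map f) ∧ (t.map f).Nodup := by simpa using h1
    have hc : (PySem.Dict.mk acc).contains (f p) = false := by
      simp only [PySem.Dict.contains, List.any_eq_false]
      intro q hq
      simpa using h2 p (by simp) q hq
    rw [show (PySem.Dict.mk acc).insert (f p) (g p) = PySem.Dict.mk (acc ++ [(f p, g p)]) by
      simp [PySem.Dict.insert, hc]]
    rw [ih (acc ++ [(f p, g p)]) hn.2 (by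
      intro p' hp' q hq
      rcases List.mem_append.1 hq with hq | hq
      · exact h2 p' (by simp [hp']) q hq
      · simp only [List.mem_singleton] at hq
        subst hq
        intro he
        apply hn.1
        have hm : f p' ∈ List.map f t := List.mem_map_of_mem (f := f) hp'
        simpa [← he] using hm)]
    simp


def spOf (l : List Int) : List (Int × Int) :=
  PySem.List.sorted (PySem.List.enumerate l) (fun x => x.2) true

def ranksOf (l : List Int) : List Int :=
  (PySem.List.enumerate (spOf l) 1).foldl (fun acc rp => acc.set rp.2.1.toNat rp.1)
    (List.replicate l.length (0 : Int))

theorem enum_fst_nodup (l : List Int) (s : Int) :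
    ((PySem.List.enumerate l s).map Prod.fst).Nodup := by
  exact List.pairwise_map.2 ((PySem.List.pairwise_lt_enumerate l s).imp (fun h => ne_of_lt h))

theorem sp_perm (l : List Int) : (spOf l).Perm (PySem.List.enumerate l) :=
  PySem.List.sorted_perm _ _ _

theorem sp_fst_nodup (l : List Int) : ((spOf l).map Prod.fst).Nodup :=
  ((sp_perm l).map Prod.fst).nodup_iff.2 (enum_fst_nodup l 0)

theorem mem_enum_self (l : List Int) (k : Nat) (hk : k < l.length) :
    ((k : Int), l.getD k 0) ∈ PySem.List.enumerate l := by
  rw [PySem.List.mem_enumerate_iff]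
  exact ⟨k, hk, by rw [List.getD_eq_getElem l 0 hk]; simp⟩

theorem rank_idx_eq (l : List Int) (i v : Int) (h : (i, v) ∈ PySem.List.enumerate l) :
    1 + (((spOf l).idxOf (i, v) : Nat) : Int) = rkey l i v := by
  have hmem : (i, v) ∈ spOf l := ((sp_perm l).mem_iff).2 h
  have hk : (spOf l).idxOf (i, v) < (spOf l).length := List.idxOf_lt_length_of_mem hmem
  have hget : (spOf l)[(spOf l).idxOf (i, v)] = (i, v) := List.getElem_idxOf hk
  have hcount := countP_eq_pos (spOf l) (sorted_pairs_pairwise l) _ hk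
  rw [hget] at hcount
  unfold rkey
  rw [← (sp_perm l).countP_eq, hcount]

theorem ranks_getD (l : List Int) (i v : Int) (h : (i, v) ∈ PySem.List.enumerate l) :
    (ranksOf l).getD i.toNat 0 = 1 + (((spOf l).idxOf (i, v) : Nat) : Int) := by
  have hmem : (i, v) ∈ spOf l := ((sp_perm l).mem_iff).2 h
  have hnn : ∀ p ∈ spOf l, 0 ≤ p.1 := by
    intro p hp
    have := ((sp_perm l).mem_iff).1 hp
    rw [PySem.List.mem_enumerate_iff] at this
    obtain ⟨k, hk, rfl⟩ := this
    simp
  have hlen : i.toNat < (List.replicate l.length (0 : Int)).length := by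
    have := ((sp_perm l).mem_iff).1 hmem
    rw [PySem.List.mem_enumerate_iff] at this
    obtain ⟨k, hk, he⟩ := this
    have : i = (k : Int) := by
      have := congrArg Prod.fst he
      simpa using this
    simp [this, hk]
  exact foldl_set_value (spOf l) 1 _ i v hmem hnn (sp_fst_nodup l) hlen

theorem rank_inj (l : List Int) (j k : Nat) (hj : j < l.length) (hk : k < l.length)
    (he : (spOf l).idxOf ((j : Int), l.getD j 0) = (spOf l).idxOf ((k : Int), l.getD k 0)) :
    j = k := by
  have hmj : ((j : Int), l.getD j 0) ∈ spOf l := ((sp_perm l).mem_iff).2 (mem_enum_self l j hj)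
  have hmk : ((k : Int), l.getD k 0) ∈ spOf l := ((sp_perm l).mem_iff).2 (mem_enum_self l k hk)
  have h1 : (spOf l)[(spOf l).idxOf ((j : Int), l.getD j 0)]? = some ((j : Int), l.getD j 0) :=
    List.getElem?_idxOf hmj
  have h2 : (spOf l)[(spOf l).idxOf ((k : Int), l.getD k 0)]? = some ((k : Int), l.getD k 0) :=
    List.getElem?_idxOf hmk
  rw [he, h2] at h1
  have := congrArg (fun o => (Option.map Prod.fst o)) h1
  simp at this
  omega

/-- the common value of both key computations -/
theorem ranks_getD_nat (l : List Int) (k : Nat) (hk : k < l.length) :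
    (ranksOf l).getD k 0 = 1 + (((spOf l).idxOf ((k : Int), l.getD k 0) : Nat) : Int) := by
  have := ranks_getD l (k : Int) (l.getD k 0) (mem_enum_self l k hk)
  simpa using this

theorem getD_ranks_nodup (l : List Int) :
    ((List.range l.length).map (fun k => (ranksOf l).getD k 0)).Nodup := by
  refine List.Nodup.map_on ?_ List.nodup_range
  intro j hj k hk he
  rw [List.mem_range] at hj hk
  rw [ranks_getD_nat l j hj, ranks_getD_nat l k hk] at he
  exact rank_inj l j k hj hk (by omega)

theorem setSequence_items (l : List Int) :
    setSequence l = (List.range l.length).map (fun k => ((ranksOf l).getD k 0, l.getD k 0)) := by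
  have hnd : ((PySem.List.pyRange 0 (l.length : Int)).map
      (fun i => PySem.List.pyGetD (ranksOf l) i 0)).Nodup := by
    rw [PySem.List.pyRange_zero_natCast, List.map_map]
    have he : ((fun i => PySem.List.pyGetD (ranksOf l) i 0) ∘ fun (k : Nat) => (k : Int))
        = fun k => (ranksOf l).getD k 0 := by
      funext k
      simp [PySem.List.pyGetD_natCast]
    rw [he]
    exact getD_ranks_nodup l
  have h : setSequence l = [] ++ (PySem.List.pyRange 0 (l.length : Int)).map
      (fun i => (PySem.List.pyGetD (ranksOf l) i 0, PySem.List.pyGetD l i 0)) :=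
    dict_fold_items (PySem.List.pyRange 0 (l.length : Int))
      (fun i => PySem.List.pyGetD (ranksOf l) i 0) (fun i => PySem.List.pyGetD l i 0) []
      hnd (by simp)
  rw [h, List.nil_append, PySem.List.pyRange_zero_natCast, List.map_map]
  refine List.map_congr_left ?_
  intro k _
  simp [Function.comp, PySem.List.pyGetD_natCast]

theorem alt_key_eq (l : List Int) (k : Nat) (hk : k < l.length) :
    1 + (l.map (fun x => if l.getD k 0 < x then (1 : Int) else 0)).sum
        + (PySem.List.count (PySem.List.slice l none (some (k : Int))) (l.getD k 0) : Int)
      = (ranksOf l).getD k 0 := by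
  have hs := PySem.List.sum_map_ite_one_zero (fun x => decide (l.getD k 0 < x)) l
  simp only [decide_eq_true_eq] at hs
  rw [hs]
  rw [PySem.List.slice_to l (by positivity)]
  rw [ranks_getD_nat l k hk, rank_idx_eq l (k : Int) (l.getD k 0) (mem_enum_self l k hk)]
  unfold rkey
  rw [countP_lexGT_enumerate l 0 (k : Int) (l.getD k 0)]
  have h1 : ((k : Int) - 0).toNat = k := by omega
  have h2 : PySem.List.count (List.take (k : Int).toNat l) (l.getD k 0)
      = (l.take ((k : Int) - 0).toNat).countP (fun x => decide (x = l.getD k 0)) := by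
    rw [h1]
    show List.count (l.getD k 0) (l.take k) = _
    rw [List.count_eq_countP]
    refine List.countP_congr ?_
    intro x _
    by_cases hx : x = l.getD k 0
    · simp
    · simp
  rw [h2]
  push_cast
  ring

theorem setSequence_alt_items (l : List Int) :
    setSequence_alt l
      = (List.range l.length).map (fun k => ((ranksOf l).getD k 0, l.getD k 0)) := by
  have hmapeq : (PySem.List.enumerate l).map
        (fun p => 1 + (l.map (fun x => if p.2 < x then (1 : Int) else 0)).sum
          + (PySem.List.count (PySem.List.slice l none (some p.1)) p.2 : Int))
      = (List.range l.length).map (fun k => (ranksOf l).getD k 0) := by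
    rw [PySem.List.enumerate_eq_map_pyRange l 0, List.map_map]
    rw [show PySem.List.pyRange 0 (PySem.List.len l)
          = List.map (fun k : Nat => (k : Int)) (List.range l.length) from by
        rw [show PySem.List.len l = ((l.length : Nat) : Int) from rfl]
        exact PySem.List.pyRange_zero_natCast _]
    rw [List.map_map]
    refine List.map_congr_left ?_
    intro k hk
    rw [List.mem_range] at hk
    simp only [Function.comp]
    simp only [PySem.List.pyGetD_natCast]
    exact alt_key_eq l k hk
  have hnd : ((PySem.List.enumerate l).map
      (fun p => 1 + (l.map (fun x => if p.2 < x then (1 : Int) else 0)).sum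
        + (PySem.List.count (PySem.List.slice l none (some p.1)) p.2 : Int))).Nodup := by
    rw [hmapeq]
    exact getD_ranks_nodup l
  have h : setSequence_alt l = [] ++ (PySem.List.enumerate l).map
      (fun p => (1 + (l.map (fun x => if p.2 < x then (1 : Int) else 0)).sum
        + (PySem.List.count (PySem.List.slice l none (some p.1)) p.2 : Int), p.2)) :=
    dict_fold_items (PySem.List.enumerate l)
      (fun p => 1 + (l.map (fun x => if p.2 < x then (1 : Int) else 0)).sum
        + (PySem.List.count (PySem.List.slice l none (some p.1)) p.2 : Int))
      (fun p => p.2) [] hnd (by simp)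
  rw [h, List.nil_append, PySem.List.enumerate_eq_map_pyRange l 0, List.map_map]
  rw [show PySem.List.pyRange 0 (PySem.List.len l)
        = List.map (fun k : Nat => (k : Int)) (List.range l.length) from by
      rw [show PySem.List.len l = ((l.length : Nat) : Int) from rfl]
      exact PySem.List.pyRange_zero_natCast _]
  rw [List.map_map]
  refine List.map_congr_left ?_
  intro k hk
  rw [List.mem_range] at hk
  simp only [Function.comp]
  simp only [PySem.List.pyGetD_natCast]
  exact Prod.ext (alt_key_eq l k hk) rfl

-- ===== VERDICT (by name: the statement is the Claim_ definition above) =====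
theorem setSequence_spec : Claim_equal_setSequence := by
  intro l _
  unfold Spec_setSequence
  rw [setSequence_items, setSequence_alt_items]
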